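-- pv_equiv track=rewrite | github.com/ANikfarjam/GeneQuest | BackEnd/routers/ConservedRegionCalc.py | define_cons_region
-- ===== SOURCE A (Python) =====
-- def define_cons_region(sequence_list):
--     """
--     Discover the conservative region in multiple aligned sequences.
--     """
--     if not sequence_list or not all(len(seq) == len(sequence_list[0]) for seq in sequence_list):
--         raise ValueError("All sequences must have the same length.")
--
--     # Transpose the sequences to compare column-wise
--     transposed = zip(*sequence_list)
--
--     # Collect positions where all characters match
--     conservative_region = []
--     for column in transposed:
--         if all(char == column[0] for char in column):
--             conservative_region.append(column[0])
--         else: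
--             conservative_region.append('-')  # Mark non-conservative regions with a placeholder
--
--     return ''.join(conservative_region)
-- ===== SOURCE B (Python) =====
-- def define_cons_region(sequence_list):
--     """
--     Discover the conservative region in multiple aligned sequences.
--     """
--     if not sequence_list or not all(len(seq) == len(sequence_list[0]) for seq in sequence_list):
--         raise ValueError("All sequences must have the same length.")
--     result = list(sequence_list[0])
--     for seq in sequence_list[1:]:
--         for i, ch in enumerate(seq):
--             if result[i] != ch:
--                 result[i] = '-'
--     return ''.join(result)
-- ===== Notes on version B (the rewrite author's own statement) =====
-- stated objective: alternative
-- what changed: B folds the consensus row-by-row into a mutable copy of the first sequence (result[i] becomes '-' on the first mismatch) instead of transposing the list and running all() per column.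
import Mathlib
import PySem

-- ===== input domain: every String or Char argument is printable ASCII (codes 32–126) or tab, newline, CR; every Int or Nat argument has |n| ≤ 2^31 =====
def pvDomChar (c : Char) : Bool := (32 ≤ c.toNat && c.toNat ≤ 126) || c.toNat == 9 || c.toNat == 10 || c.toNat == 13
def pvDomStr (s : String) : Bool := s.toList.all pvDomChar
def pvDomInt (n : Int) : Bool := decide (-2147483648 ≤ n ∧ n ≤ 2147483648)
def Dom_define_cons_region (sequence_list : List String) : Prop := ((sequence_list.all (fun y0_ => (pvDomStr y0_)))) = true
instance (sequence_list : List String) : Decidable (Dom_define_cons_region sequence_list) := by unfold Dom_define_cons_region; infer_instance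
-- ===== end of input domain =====

-- B folds the consensus row-by-row into a copy of the first sequence instead of
-- transposing and testing each column with all(); same cost, different decomposition.


-- ===== PORT A =====
-- zip(*sequence_list) is ported as the list of columns indexed by the first row's
-- length; this is exact under Pre_ (all rows have the first row's length).
def define_cons_region (sequence_list : List String) : String :=
  let rows := sequence_list.map String.toList
  let transposed := (List.range (rows.headD []).length).map
      (fun i => rows.map (fun r => r.getD i ' '))
  let region := transposed.map (fun col =>
      if col.all (fun ch => ch == col.headD ' ') then col.headD ' ' else '-')
  String.mk region

-- ===== PORT B =====
def define_cons_region_alt (sequence_list : List String) : String :=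
  match sequence_list with
  | [] => ""   -- Python raises ValueError here; outside Pre_
  | first :: rest =>
    String.mk (rest.foldl
      (fun res s => List.zipWith (fun r c => if r = c then r else '-') res s.toList)
      first.toList)

-- ===== PRECONDITION & SPEC =====
-- Pre_ excludes exactly the inputs on which A (and B) raise ValueError:
-- the empty list, and lists whose sequences do not all share the first one's length.
def Pre_define_cons_region (sequence_list : List String) : Prop :=
  sequence_list ≠ [] ∧
  ∀ s ∈ sequence_list, s.toList.length = (sequence_list.headD "").toList.length
instance (sequence_list : List String) : Decidable (Pre_define_cons_region sequence_list) := by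
  unfold Pre_define_cons_region; infer_instance

def pvWitness_define_cons_region : List String := ["ACGT", "ACCT", "AC-T"]

def Spec_define_cons_region (sequence_list : List String) (out : String) : Prop := out = define_cons_region_alt sequence_list
instance (sequence_list : List String) (out : String) : Decidable (Spec_define_cons_region sequence_list out) := by unfold Spec_define_cons_region; infer_instance

-- ===== CLAIM (what is proved, stated in full; the proofs are below) =====
def Claim_equal_define_cons_region : Prop := ∀ (sequence_list : List String), Dom_define_cons_region sequence_list → Pre_define_cons_region sequence_list → Spec_define_cons_region sequence_list (define_cons_region sequence_list)

-- ===== LEMMAS AND PROOFS =====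

-- range-map of getD reproduces the list
theorem map_getD_range (l : List Char) :
    (List.range l.length).map (fun i => l.getD i ' ') = l := by
  apply List.ext_getElem
  · simp
  · intro i h1 h2
    simp [List.getD_eq_getElem?_getD, List.getElem?_eq_getElem h2]

-- the fold of pointwise zipWith, read pointwise
theorem fold_eq_map (g : Char → Char → Char) (t : List String) (init : List Char)
    (hlen : ∀ s ∈ t, s.toList.length = init.length) :
    t.foldl (fun res s => List.zipWith g res s.toList) init
      = (List.range init.length).map (fun i =>
          t.foldl (fun a s => g a (s.toList.getD i ' ')) (init.getD i ' ')) := by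
  induction t generalizing init with
  | nil => exact (map_getD_range init).symm
  | cons s t ih =>
    have hs : s.toList.length = init.length := hlen s (by simp)
    have hz : (List.zipWith g init s.toList).length = init.length := by
      simp [List.length_zipWith, hs]
    simp only [List.foldl_cons]
    rw [ih _ (by intro x hx; rw [List.length_zipWith, hs, Nat.min_self]; exact hlen x (by simp [hx])), hz]
    apply List.map_congr_left
    intro i hi
    have hi' : i < init.length := List.mem_range.mp hi
    congr 1
    rw [List.getD_eq_getElem _ _ (by omega), List.getElem_zipWith,
        List.getD_eq_getElem _ _ hi', List.getD_eq_getElem _ _ (by omega)]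

-- the scalar fold at one column
theorem scalar_fold (t : List String) (i : Nat) (a : Char) :
    t.foldl (fun x s => if x = s.toList.getD i ' ' then x else '-') a
      = if ∀ s ∈ t, s.toList.getD i ' ' = a then a else '-' := by
  induction t generalizing a with
  | nil => simp
  | cons s t ih =>
    rw [List.foldl_cons]
    by_cases h : a = s.toList.getD i ' '
    · rw [if_pos h, ih]
      have hs : s.toList.getD i ' ' = a := h.symm
      simp only [List.forall_mem_cons, hs, true_and]
    · rw [if_neg h, ih]
      have hn : ¬ ∀ x ∈ s :: t, x.toList.getD i ' ' = a :=
        fun hall => h (hall s (by simp)).symm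
      rw [if_neg hn]
      split <;> rfl

-- one column of A's loop body, in closed form
theorem col_lemma (c : Char) (l : List Char) :
    (if (c :: l).all (fun ch => ch == (c :: l).headD ' ') then (c :: l).headD ' ' else '-')
      = if ∀ x ∈ l, x = c then c else '-' := by
  by_cases hp : ∀ x ∈ l, x = c
  · simp
  · simp [List.all_eq_true, hp]

-- ===== VERDICT (by name: the statement is the Claim_ definition above) =====
theorem define_cons_region_spec : Claim_equal_define_cons_region := by
  intro xs _ hpre
  obtain ⟨hne, hlen⟩ := hpre
  unfold Spec_define_cons_region
  match xs with
  | [] => exact absurd rfl hne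
  | h :: t =>
    simp only [List.headD_cons] at hlen
    unfold define_cons_region define_cons_region_alt
    simp only [List.map_cons, List.headD_cons, List.map_map]
    rw [fold_eq_map _ t h.toList (fun s hs => hlen s (by simp [hs]))]
    congr 1
    apply List.map_congr_left
    intro i hi
    rw [scalar_fold]
    simp only [Function.comp_apply]
    rw [col_lemma]
    simp only [List.forall_mem_map, Function.comp_apply]
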